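-- pv_equiv track=rewrite | github.com/jatufin/lausegeneraattori | src/output_diagnose.py | get_following_word_occurences
-- ===== SOURCE A (Python) =====
-- def get_following_word_occurences(wordlist, prefix):
--     """Count the appearances of different words after given prefix
--
--     Args:
--         wordlist : List of strings
--         prefix : List of strings
--
--     Returns:
--         Dictionary of strings (words) as keys and integers (occurences)
--         as values.
--
--     Example:
--         Args:
--             wordlist = ["aa", "bb", "cc", "bb", "dd", "aa", "bb", "cc", "aa", "bb", "aa"]
--             prefix = ["aa", "bb"]
--         Returns:
--             {"cc" : 2, "aa": 1}
--     """
--     return_dict = {}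
--
--     prefix_length = len(prefix)
--
--     for i in range(len(wordlist) - prefix_length):
--
--         if wordlist[i:i+prefix_length] == list(prefix):  # prefix migth be list or tuple
--
--             following_word = wordlist[i+prefix_length]
--             if following_word in return_dict:
--                 return_dict[following_word] += 1
--             else:
--                 return_dict[following_word] = 1
--
--     return return_dict
-- ===== SOURCE B (Python) =====
-- def get_following_word_occurences(wordlist, prefix):
--     """Staged-filtering rewrite (same cost, different structure): instead of comparing a full window at each
--     position, start from all candidate start positions and make one pass per
--     pattern word, pruning the candidate set; then tally the follower words."""
--     n, k = len(wordlist), len(prefix)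
--     candidates = list(range(n - k))
--     for j, pw in enumerate(prefix):
--         candidates = [i for i in candidates if wordlist[i + j] == pw]
--     counts = {}
--     for i in candidates:
--         w = wordlist[i + k]
--         counts[w] = counts.get(w, 0) + 1
--     return counts
-- ===== Notes on version B (the rewrite author's own statement) =====
-- stated objective: alternative
-- what changed: A loops over positions and compares a full length-k window slice at each, updating a dict with an in/else branch; B inverts the loop nesting: one pruning pass per pattern word over a shrinking candidate-position list (no window slicing), then a separate tally pass over the surviving followers.
import Mathlib
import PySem

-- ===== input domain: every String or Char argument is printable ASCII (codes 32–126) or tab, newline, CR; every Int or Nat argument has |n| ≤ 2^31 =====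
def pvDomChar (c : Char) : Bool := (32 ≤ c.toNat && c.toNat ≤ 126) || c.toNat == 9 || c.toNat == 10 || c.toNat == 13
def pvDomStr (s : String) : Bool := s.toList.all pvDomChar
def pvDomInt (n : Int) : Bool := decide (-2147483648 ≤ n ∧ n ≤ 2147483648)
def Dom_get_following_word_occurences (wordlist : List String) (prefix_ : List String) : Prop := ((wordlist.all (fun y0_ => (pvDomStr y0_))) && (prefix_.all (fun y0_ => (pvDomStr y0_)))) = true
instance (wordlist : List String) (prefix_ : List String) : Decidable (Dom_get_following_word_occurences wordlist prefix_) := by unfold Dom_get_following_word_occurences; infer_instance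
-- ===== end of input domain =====

-- B replaces A's position-outer loop with a full window-slice comparison at each
-- position by pattern-outer staged filtering (one pruning pass per pattern word
-- over a shrinking candidate-position list, no slicing) plus a separate tally
-- pass; same worst-case cost, different structure ("alternative").

-- ===== PORT A =====
def get_following_word_occurences (wordlist : List String) (prefix_ : List String) : List (String × Int) :=
  let return_dict : PySem.Dict String Int := PySem.Dict.empty
  let prefix_length : Int := (prefix_.length : Int)
  let return_dict :=
    (PySem.List.pyRange 0 ((wordlist.length : Int) - prefix_length) 1).foldl
      (fun return_dict i =>
        if PySem.List.slice wordlist (some i) (some (i + prefix_length)) = prefix_ then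
          let following_word := PySem.List.pyGetD wordlist (i + prefix_length) ""
          if return_dict.contains following_word then
            return_dict.insert following_word (return_dict.getD following_word 0 + 1)
          else
            return_dict.insert following_word 1
        else return_dict)
      return_dict
  return_dict.items

-- ===== PORT B =====
def get_following_word_occurences_alt (wordlist : List String) (prefix_ : List String) : List (String × Int) :=
  let n : Int := (wordlist.length : Int)
  let k : Int := (prefix_.length : Int)
  let candidates : List Int := PySem.List.pyRange 0 (n - k) 1
  let candidates :=
    (PySem.List.enumerate prefix_ 0).foldl
      (fun cand jp => cand.filter (fun i => PySem.List.pyGetD wordlist (i + jp.1) "" == jp.2))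
      candidates
  let counts : PySem.Dict String Int :=
    candidates.foldl
      (fun d i =>
        let w := PySem.List.pyGetD wordlist (i + k) ""
        d.insert w (d.getD w 0 + 1))
      PySem.Dict.empty
  counts.items

-- ===== PRECONDITION & SPEC =====
def Spec_get_following_word_occurences (wordlist : List String) (prefix_ : List String) (out : List (String × Int)) : Prop := out = get_following_word_occurences_alt wordlist prefix_
instance (wordlist : List String) (prefix_ : List String) (out : List (String × Int)) : Decidable (Spec_get_following_word_occurences wordlist prefix_ out) := by unfold Spec_get_following_word_occurences; infer_instance

-- ===== CLAIM (what is proved, stated in full; the proofs are below) =====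
def Claim_equal_get_following_word_occurences : Prop := ∀ (wordlist : List String) (prefix_ : List String), Dom_get_following_word_occurences wordlist prefix_ → Spec_get_following_word_occurences wordlist prefix_ (get_following_word_occurences wordlist prefix_)

-- ===== LEMMAS AND PROOFS =====

-- A's fused "scan indices, update dict on match" loop is the counter fold over
-- the list of follower words it would collect.
lemma foldl_guard {α β γ : Type} (p : α → Bool) (f : α → β) (g : γ → β → γ)
    (l : List α) (init : γ) :
    l.foldl (fun acc x => if p x then g acc (f x) else acc) init
      = ((l.filter p).map f).foldl g init := by
  induction l generalizing init with
  | nil => rfl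
  | cons x xs ih =>
      by_cases h : p x = true
      · simp [h, ih]
      · simp only [Bool.not_eq_true] at h
        simp [h, ih]

-- A's two dict-update branches coincide.
lemma insert_branch_eq (d : PySem.Dict String Int) (w : String) :
    (if d.contains w then d.insert w (d.getD w 0 + 1) else d.insert w 1)
      = d.insert w (d.getD w 0 + 1) := by
  by_cases h : d.contains w = true
  · simp [h]
  · simp only [Bool.not_eq_true] at h
    simp [h, PySem.Dict.getD_of_not_contains d 0 h]

-- folding successive filters is one filter by the conjunction of the tests
lemma foldl_filter_eq_filter_all {α β : Type} (ps : List β) (t : β → α → Bool)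
    (c : List α) :
    ps.foldl (fun cand p => cand.filter (t p)) c
      = c.filter (fun i => ps.all (fun p => t p i)) := by
  induction ps generalizing c with
  | nil => simp
  | cons p ps ih => simp [ih, List.filter_filter, Bool.and_comm]

-- the window-slice comparison at an in-range start equals the per-word tests
lemma slice_eq_iff_all (wordlist prefix_ : List String) (i : Int)
    (h0 : 0 ≤ i) (h1 : i < (wordlist.length : Int) - (prefix_.length : Int)) :
    (PySem.List.slice wordlist (some i) (some (i + (prefix_.length : Int))) = prefix_)
      ↔ ((PySem.List.enumerate prefix_ 0).all
          (fun jp => PySem.List.pyGetD wordlist (i + jp.1) "" == jp.2)) = true := by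
  obtain ⟨a, rfl⟩ : ∃ a : Nat, i = (a : Int) := ⟨i.toNat, (Int.toNat_of_nonneg h0).symm⟩
  have hlen : a + prefix_.length ≤ wordlist.length := by
    omega
  rw [PySem.List.slice_natCast_add]
  constructor
  · intro hsl
    rw [List.all_eq_true]
    intro jp hjp
    rw [PySem.List.mem_enumerate_iff] at hjp
    obtain ⟨j, hj, rfl⟩ := hjp
    have : (0 : Int) + (j : Int) = ((j : Nat) : Int) := by omega
    simp only [this]
    have ha : ((a : Int) + (j : Int)) = (((a + j : Nat)) : Int) := by push_cast; ring
    rw [ha, PySem.List.pyGetD_natCast]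
    have hlt : a + j < wordlist.length := by omega
    rw [List.getD_eq_getElem _ _ hlt, beq_iff_eq]
    have := congrArg (fun l => l[j]?) hsl
    simpa [List.getElem?_take, hj, List.getElem?_drop,
      List.getElem?_eq_getElem hlt, List.getElem?_eq_getElem hj] using this
  · intro hall
    rw [List.all_eq_true] at hall
    apply List.ext_getElem
    · simp; omega
    · intro j hj1 hj2
      have hj : j < prefix_.length := hj2
      have hmem : ((0 : Int) + (j : Int), prefix_[j]) ∈ PySem.List.enumerate prefix_ 0 := by
        rw [PySem.List.mem_enumerate_iff]; exact ⟨j, hj, rfl⟩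
      have := hall _ hmem
      simp only [beq_iff_eq] at this
      have ha : ((a : Int) + ((0 : Int) + (j : Int))) = (((a + j : Nat)) : Int) := by
        push_cast; ring
    -- reduce the pyGetD fact to a getElem fact
      rw [ha, PySem.List.pyGetD_natCast] at this
      have hlt : a + j < wordlist.length := by omega
      rw [List.getD_eq_getElem _ _ hlt] at this
      simpa [List.getElem_take, List.getElem_drop] using this

lemma main_eq (wordlist prefix_ : List String) :
    get_following_word_occurences wordlist prefix_
      = get_following_word_occurences_alt wordlist prefix_ := by
  unfold get_following_word_occurences get_following_word_occurences_alt
  simp only []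
  -- normalise A's prop-if into a bool-guarded fold, merge its two branches
  have hbranch :
      (fun (d : PySem.Dict String Int) (i : Int) =>
        if PySem.List.slice wordlist (some i) (some (i + (prefix_.length : Int))) = prefix_ then
          let following_word := PySem.List.pyGetD wordlist (i + (prefix_.length : Int)) ""
          if d.contains following_word then
            d.insert following_word (d.getD following_word 0 + 1)
          else d.insert following_word 1
        else d)
      = (fun (d : PySem.Dict String Int) (i : Int) =>
        if decide (PySem.List.slice wordlist (some i) (some (i + (prefix_.length : Int))) = prefix_) then
          d.insert (PySem.List.pyGetD wordlist (i + (prefix_.length : Int)) "")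
            ((d.getD (PySem.List.pyGetD wordlist (i + (prefix_.length : Int)) "") 0) + 1)
        else d) := by
    funext d i
    by_cases h : PySem.List.slice wordlist (some i) (some (i + (prefix_.length : Int))) = prefix_
    · simp only [h, if_true, decide_true, insert_branch_eq]
    · simp [h]
  rw [hbranch,
    foldl_guard
      (fun i => decide (PySem.List.slice wordlist (some i) (some (i + (prefix_.length : Int))) = prefix_))
      (fun i => PySem.List.pyGetD wordlist (i + (prefix_.length : Int)) "")
      (fun (d : PySem.Dict String Int) w => d.insert w (d.getD w 0 + 1))]
  -- B's pruning passes are one filter; B's tally fold is the fold over the mapped followers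
  rw [foldl_filter_eq_filter_all (PySem.List.enumerate prefix_ 0)
    (fun jp i => PySem.List.pyGetD wordlist (i + jp.1) "" == jp.2)]
  have hf :
      List.filter
        (fun i => decide (PySem.List.slice wordlist (some i) (some (i + (prefix_.length : Int))) = prefix_))
        (PySem.List.pyRange 0 ((wordlist.length : Int) - (prefix_.length : Int)) 1)
      = List.filter
        (fun i => (PySem.List.enumerate prefix_ 0).all
          (fun jp => PySem.List.pyGetD wordlist (i + jp.1) "" == jp.2))
        (PySem.List.pyRange 0 ((wordlist.length : Int) - (prefix_.length : Int)) 1) := by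
    apply List.filter_congr
    intro i hi
    rw [PySem.List.mem_pyRange_one] at hi
    have h := slice_eq_iff_all wordlist prefix_ i hi.1 hi.2
    cases hb : (PySem.List.enumerate prefix_ 0).all
        (fun jp => PySem.List.pyGetD wordlist (i + jp.1) "" == jp.2) with
    | false =>
        rw [hb] at h
        apply decide_eq_false
        intro hs
        exact Bool.false_ne_true (h.mp hs)
    | true =>
        exact decide_eq_true (h.mpr hb)
  rw [hf, List.foldl_map]

-- ===== VERDICT (by name: the statement is the Claim_ definition above) =====
theorem get_following_word_occurences_spec : Claim_equal_get_following_word_occurences := by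
  intro wordlist prefix_ _
  unfold Spec_get_following_word_occurences
  exact main_eq wordlist prefix_
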